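-- pv_equiv track=rewrite | github.com/aguilarcarboni/express-entry | express_entry.py | crs_language_primary
-- ===== SOURCE A (Python) =====
-- from typing import Dict, List, Tuple
--
-- def crs_language_primary(clb: Dict[str, int]) -> int:
--     score = 0
--     for level in clb.values():
--         if level >= 10:
--             score += 34
--         elif level == 9:
--             score += 31
--         elif level == 8:
--             score += 23
--         elif level == 7:
--             score += 17
--         elif level == 6:
--             score += 9
--         elif level == 5:
--             score += 6
--     return score
-- ===== SOURCE B (Python) =====
-- # Threshold-increment decomposition: each CLB threshold t contributes a fixed
-- # increment for every language whose level reaches t, so the score is a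
-- # weighted sum of threshold counts instead of a per-value point lookup.
-- _INC = [(5, 6), (6, 3), (7, 8), (8, 6), (9, 8), (10, 3)]
--
-- def crs_language_primary(clb):
--     levels = list(clb.values())
--     return sum(w * sum(1 for lv in levels if lv >= t) for t, w in _INC)
-- ===== Notes on version B (the rewrite author's own statement) =====
-- stated objective: alternative
-- what changed: Replaces the per-value if/elif point cascade by a threshold-increment decomposition: the marginal point increments at CLB 5..10 are fixed, so the score is computed as a weighted sum, over the six thresholds, of the count of levels reaching each threshold.
import Mathlib
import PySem

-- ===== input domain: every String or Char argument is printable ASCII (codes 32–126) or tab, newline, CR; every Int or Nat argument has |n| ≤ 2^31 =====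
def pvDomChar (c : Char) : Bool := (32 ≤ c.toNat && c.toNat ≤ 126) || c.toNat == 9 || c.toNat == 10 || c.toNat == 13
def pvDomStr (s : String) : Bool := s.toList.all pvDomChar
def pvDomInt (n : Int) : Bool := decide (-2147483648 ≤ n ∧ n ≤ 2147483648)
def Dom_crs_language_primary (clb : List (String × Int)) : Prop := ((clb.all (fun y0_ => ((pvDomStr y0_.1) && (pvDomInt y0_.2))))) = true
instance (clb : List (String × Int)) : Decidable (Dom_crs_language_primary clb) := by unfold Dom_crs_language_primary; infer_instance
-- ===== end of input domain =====

-- B replaces the per-value if/elif cascade by a weighted sum of threshold counts (marginal increments at CLB 5..10); objective: alternative.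


-- ===== PORT A =====
def crs_language_primary (clb : List (String × Int)) : Int :=
  clb.foldl (fun score p =>
    let level := p.2
    if level ≥ 10 then score + 34
    else if level = 9 then score + 31
    else if level = 8 then score + 23
    else if level = 7 then score + 17
    else if level = 6 then score + 9
    else if level = 5 then score + 6
    else score) 0

-- ===== PORT B =====
-- marginal point increments at each CLB threshold
def pvInc : List (Int × Int) := [(5, 6), (6, 3), (7, 8), (8, 6), (9, 8), (10, 3)]

-- count of levels reaching threshold t (the inner 'sum(1 for lv in levels if lv >= t)')
def pvCountGe (levels : List Int) (t : Int) : Int :=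
  ((levels.filter (fun lv => decide (t ≤ lv))).length : Int)

def crs_language_primary_alt (clb : List (String × Int)) : Int :=
  (pvInc.map (fun tw => tw.2 * pvCountGe (clb.map Prod.snd) tw.1)).sum

-- ===== PRECONDITION & SPEC =====
def Spec_crs_language_primary (clb : List (String × Int)) (out : Int) : Prop := out = crs_language_primary_alt clb
instance (clb : List (String × Int)) (out : Int) : Decidable (Spec_crs_language_primary clb out) := by unfold Spec_crs_language_primary; infer_instance

-- ===== CLAIM (what is proved, stated in full; the proofs are below) =====
def Claim_equal_crs_language_primary : Prop := ∀ (clb : List (String × Int)), Dom_crs_language_primary clb → Spec_crs_language_primary clb (crs_language_primary clb)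

-- ===== LEMMAS AND PROOFS =====

theorem pvCountGe_cons (l : Int) (t : Int) (ls : List Int) :
    pvCountGe (l :: ls) t = (if t ≤ l then 1 else 0) + pvCountGe ls t := by
  simp [pvCountGe, List.filter_cons]
  split_ifs <;> simp <;> omega

set_option maxHeartbeats 1600000 in
theorem pv_alt_cons (p : String × Int) (t : List (String × Int)) :
    crs_language_primary_alt (p :: t)
      = (if p.2 ≥ 10 then (34 : Int)
         else if p.2 = 9 then 31 else if p.2 = 8 then 23 else if p.2 = 7 then 17
         else if p.2 = 6 then 9 else if p.2 = 5 then 6 else 0)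
        + crs_language_primary_alt t := by
  simp only [crs_language_primary_alt, pvInc, List.map_cons, List.map_nil, List.sum_cons,
    List.sum_nil, pvCountGe_cons]
  split_ifs <;> omega

theorem pv_foldl_eq (clb : List (String × Int)) (s : Int) :
    clb.foldl (fun score p =>
      let level := p.2
      if level ≥ 10 then score + 34
      else if level = 9 then score + 31
      else if level = 8 then score + 23
      else if level = 7 then score + 17
      else if level = 6 then score + 9
      else if level = 5 then score + 6
      else score) s
    = s + crs_language_primary_alt clb := by
  induction clb generalizing s with
  | nil => simp [crs_language_primary_alt, pvInc, pvCountGe]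
  | cons p t ih =>
    simp only [List.foldl_cons, ih, pv_alt_cons]
    split_ifs <;> omega

-- ===== VERDICT (by name: the statement is the Claim_ definition above) =====
theorem crs_language_primary_spec : Claim_equal_crs_language_primary := by
  intro clb _
  unfold Spec_crs_language_primary crs_language_primary
  simpa using pv_foldl_eq clb 0
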